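-- pv_equiv track=rewrite | github.com/HarkonenBade/stonks-bot | cogs/stonks.py | day_norm
-- ===== SOURCE A (Python) =====
-- def day_norm(val):
--     dmap = {'mon': ['monday'],
--             'tue': ['tues', 'tuesday'],
--             'wed': ['weds', 'wednesday', 'wednessday'],
--             'thu': ['thur', 'thurs', 'thursday'],
--             'fri': ['friday'],
--             'sat': ['saturday'],
--             'sun': ['sunday']}
--
--     # Creates the reverse day map, where each key maps to itself, and every entry in the value list maps to it's key
--     idmap = {k:k for k in dmap.keys()}
--     idmap.update({v:k for k, vl in dmap.items() for v in vl})
--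
--     val = val.lower().strip()
--
--     if val in idmap:
--         return idmap[val]
--     else:
--         raise ValueError
-- ===== SOURCE B (Python) =====
-- VALID = {'mon', 'monday',
--          'tue', 'tues', 'tuesday',
--          'wed', 'weds', 'wednesday', 'wednessday',
--          'thu', 'thur', 'thurs', 'thursday',
--          'fri', 'friday',
--          'sat', 'saturday',
--          'sun', 'sunday'}
--
--
-- def day_norm(val):
--     # validate-then-truncate: every accepted spelling's canonical form is its
--     # own first three letters, so no key->aliases mapping is needed at all.
--     val = val.lower().strip()
--     if val in VALID:
--         return val[:3]
--     raise ValueError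
-- ===== Notes on version B (the rewrite author's own statement) =====
-- stated objective: simpler
-- what changed: B replaces the key->aliases mapping and reverse-index lookup with validate-then-truncate: it keeps only a flat set of accepted spellings and computes the canonical key as the input's first three letters (val[:3]) instead of retrieving it from any map.
import Mathlib
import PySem

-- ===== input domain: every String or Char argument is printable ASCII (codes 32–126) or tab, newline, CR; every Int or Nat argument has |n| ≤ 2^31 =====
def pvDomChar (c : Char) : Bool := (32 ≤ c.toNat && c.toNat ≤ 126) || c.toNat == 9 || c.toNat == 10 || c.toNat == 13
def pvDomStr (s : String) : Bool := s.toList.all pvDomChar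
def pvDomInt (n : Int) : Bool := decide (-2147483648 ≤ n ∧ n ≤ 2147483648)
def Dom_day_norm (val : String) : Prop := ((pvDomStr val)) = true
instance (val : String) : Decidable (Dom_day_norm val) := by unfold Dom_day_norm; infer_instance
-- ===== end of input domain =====

-- B replaces the key->aliases table and reverse-index lookup with validate-then-truncate
-- (a flat set of accepted spellings; the canonical key is the input's first three letters).
-- Both programs raise ValueError on unrecognised input; Pre_ excludes exactly those inputs.

-- ===== PORT A =====
-- the literal dmap of A
def pvDmapList : List (String × List String) :=
  [("mon", ["monday"]),
   ("tue", ["tues", "tuesday"]),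
   ("wed", ["weds", "wednesday", "wednessday"]),
   ("thu", ["thur", "thurs", "thursday"]),
   ("fri", ["friday"]),
   ("sat", ["saturday"]),
   ("sun", ["sunday"])]

-- A's reverse-map build and lookup, applied to the already lower().strip()'ed value
def pvIdmapLookup (v : String) : String :=
  let dmap : PySem.Dict String (List String) := PySem.Dict.ofList pvDmapList
  -- idmap = {k: k for k in dmap.keys()}
  let idmap : PySem.Dict String String :=
    (dmap.keys).foldl (fun d k => d.insert k k) PySem.Dict.empty
  -- idmap.update({v: k for k, vl in dmap.items() for v in vl})
  let idmap :=
    idmap.update ((dmap.items).foldl (fun acc kv => acc ++ kv.2.map (fun w => (w, kv.1))) [])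
  if idmap.contains v then idmap.getD v "" else ""   -- else: raise ValueError (excluded by Pre_)

def day_norm (val : String) : String :=
  pvIdmapLookup (PySem.Str.strip (PySem.Str.lower val))

-- ===== PORT B =====
-- B's flat set VALID of all accepted spellings (a Python set literal)
def pvValid : PySem.Set String :=
  PySem.Set.ofList
    ["mon", "monday",
     "tue", "tues", "tuesday",
     "wed", "weds", "wednesday", "wednessday",
     "thu", "thur", "thurs", "thursday",
     "fri", "friday",
     "sat", "saturday",
     "sun", "sunday"]

def day_norm_alt (val : String) : String :=
  let v := PySem.Str.strip (PySem.Str.lower val)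
  if v ∈ pvValid then PySem.Str.slice v none (some 3)   -- return val[:3]
  else ""                                               -- raise ValueError (excluded by Pre_)

-- ===== PRECONDITION & SPEC =====
-- Pre_ excludes exactly the inputs on which A (and B) raise ValueError: those whose
-- lowered, stripped form is not one of the 19 recognised day names.
def Pre_day_norm (val : String) : Prop :=
  PySem.Str.strip (PySem.Str.lower val) ∈
    ["mon", "monday", "tue", "tues", "tuesday", "wed", "weds", "wednesday", "wednessday",
     "thu", "thur", "thurs", "thursday", "fri", "friday", "sat", "saturday", "sun", "sunday"]
instance (val : String) : Decidable (Pre_day_norm val) := by unfold Pre_day_norm; infer_instance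

def pvWitness_day_norm : String := " Tuesday "

def Spec_day_norm (val : String) (out : String) : Prop := out = day_norm_alt val
instance (val : String) (out : String) : Decidable (Spec_day_norm val out) := by unfold Spec_day_norm; infer_instance

-- ===== CLAIM =====
def Claim_equal_day_norm : Prop := ∀ (val : String), Dom_day_norm val → Pre_day_norm val → Spec_day_norm val (day_norm val)

-- ===== LEMMAS AND PROOFS =====
-- On every recognised day name A's reverse-map lookup equals B's validate-then-truncate (19 closed cases).
theorem pvLookup_agree (w : String)
    (hw : w ∈ ["mon", "monday", "tue", "tues", "tuesday", "wed", "weds", "wednesday",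
               "wednessday", "thu", "thur", "thurs", "thursday", "fri", "friday",
               "sat", "saturday", "sun", "sunday"]) :
    pvIdmapLookup w = (if w ∈ pvValid then PySem.Str.slice w none (some 3) else "") := by
  fin_cases hw <;> decide

-- ===== VERDICT =====
theorem day_norm_spec : Claim_equal_day_norm := by
  intro val _ hpre
  exact pvLookup_agree _ hpre
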